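-- pv_equiv track=rewrite | github.com/GustavoDanielL/Nova-pasta | utils/formatters.py | formatar_cpf_cnpj
-- ===== SOURCE A (Python) =====
-- def formatar_cpf_cnpj(valor):
--     """Formata CPF (###.###.###-##) ou CNPJ (##.###.###/####-##) automaticamente"""
--     # Remove tudo que não é número
--     numeros = ''.join(c for c in valor if c.isdigit())
--
--     if len(numeros) <= 11:  # CPF
--         # Formato: 000.000.000-00
--         if len(numeros) <= 3:
--             return numeros
--         elif len(numeros) <= 6:
--             return f"{numeros[:3]}.{numeros[3:]}"
--         elif len(numeros) <= 9:
--             return f"{numeros[:3]}.{numeros[3:6]}.{numeros[6:]}"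
--         else:
--             return f"{numeros[:3]}.{numeros[3:6]}.{numeros[6:9]}-{numeros[9:11]}"
--     else:  # CNPJ
--         # Formato: 00.000.000/0000-00
--         if len(numeros) <= 2:
--             return numeros
--         elif len(numeros) <= 5:
--             return f"{numeros[:2]}.{numeros[2:]}"
--         elif len(numeros) <= 8:
--             return f"{numeros[:2]}.{numeros[2:5]}.{numeros[5:]}"
--         elif len(numeros) <= 12:
--             return f"{numeros[:2]}.{numeros[2:5]}.{numeros[5:8]}/{numeros[8:]}"
--         else:
--             return f"{numeros[:2]}.{numeros[2:5]}.{numeros[5:8]}/{numeros[8:12]}-{numeros[12:14]}"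
-- ===== SOURCE B (Python) =====
-- def formatar_cpf_cnpj(valor):
--     """Formata CPF (###.###.###-##) ou CNPJ (##.###.###/####-##) automaticamente"""
--     numeros = ''.join(c for c in valor if c.isdigit())
--     mask = 'XXX.XXX.XXX-XX' if len(numeros) <= 11 else 'XX.XXX.XXX/XXXX-XX'
--     out = []
--     i = 0
--     for m in mask:
--         if i == len(numeros):
--             break
--         if m == 'X':
--             out.append(numeros[i])
--             i += 1
--         else:
--             out.append(m)
--     return ''.join(out)
-- ===== Notes on version B (the rewrite author's own statement) =====
-- stated objective: simpler
-- what changed: Replaces A's nine hand-written length-branch/slice cases with a single data-driven fill loop: pick one of two format masks by digit count and walk the mask, emitting the next digit at each placeholder and the literal separator otherwise, stopping when the digits run out.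
import Mathlib
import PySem

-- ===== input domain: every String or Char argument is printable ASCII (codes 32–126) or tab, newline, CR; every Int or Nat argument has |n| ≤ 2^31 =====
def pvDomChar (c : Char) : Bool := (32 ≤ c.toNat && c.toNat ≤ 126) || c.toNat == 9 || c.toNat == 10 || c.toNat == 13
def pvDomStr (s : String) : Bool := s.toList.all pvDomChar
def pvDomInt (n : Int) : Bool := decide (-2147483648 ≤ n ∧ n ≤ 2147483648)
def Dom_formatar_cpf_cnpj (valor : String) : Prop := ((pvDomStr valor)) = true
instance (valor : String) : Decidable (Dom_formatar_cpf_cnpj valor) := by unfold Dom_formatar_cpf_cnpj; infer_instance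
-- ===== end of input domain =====

-- B replaces A's nine hand-written slice/branch cases by one mask-driven fill loop
-- ('XXX.XXX.XXX-XX' / 'XX.XXX.XXX/XXXX-XX'); objective: simpler.

-- ===== PORT A =====
-- literal transliteration of A: extract the digits, then the branch ladder over
-- len, each branch concatenating Python slices of numeros (PySem.List.slice).
def formatar_cpf_cnpj (valor : String) : String :=
  let numeros := valor.toList.filter PySem.Chars.isdigit
  let n := numeros.length
  if n ≤ 11 then  -- CPF
    if n ≤ 3 then String.ofList numeros
    else if n ≤ 6 then
      String.ofList (PySem.List.slice numeros none (some 3) ++ '.' :: PySem.List.slice numeros (some 3) none)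
    else if n ≤ 9 then
      String.ofList (PySem.List.slice numeros none (some 3) ++ '.' :: PySem.List.slice numeros (some 3) (some 6)
        ++ '.' :: PySem.List.slice numeros (some 6) none)
    else
      String.ofList (PySem.List.slice numeros none (some 3) ++ '.' :: PySem.List.slice numeros (some 3) (some 6)
        ++ '.' :: PySem.List.slice numeros (some 6) (some 9) ++ '-' :: PySem.List.slice numeros (some 9) (some 11))
  else  -- CNPJ
    if n ≤ 2 then String.ofList numeros
    else if n ≤ 5 then
      String.ofList (PySem.List.slice numeros none (some 2) ++ '.' :: PySem.List.slice numeros (some 2) none)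
    else if n ≤ 8 then
      String.ofList (PySem.List.slice numeros none (some 2) ++ '.' :: PySem.List.slice numeros (some 2) (some 5)
        ++ '.' :: PySem.List.slice numeros (some 5) none)
    else if n ≤ 12 then
      String.ofList (PySem.List.slice numeros none (some 2) ++ '.' :: PySem.List.slice numeros (some 2) (some 5)
        ++ '.' :: PySem.List.slice numeros (some 5) (some 8) ++ '/' :: PySem.List.slice numeros (some 8) none)
    else
      String.ofList (PySem.List.slice numeros none (some 2) ++ '.' :: PySem.List.slice numeros (some 2) (some 5)
        ++ '.' :: PySem.List.slice numeros (some 5) (some 8) ++ '/' :: PySem.List.slice numeros (some 8) (some 12)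
        ++ '-' :: PySem.List.slice numeros (some 12) (some 14))

-- ===== PORT B =====
-- B's loop over the mask: the index i into numeros becomes the remaining-digits
-- list; 'break when i == len(numeros)' is the first pattern.
def pvMaskFill : List Char → List Char → List Char
  | _, [] => []
  | [], _ :: _ => []
  | m :: ms, d :: ds =>
    if m = 'X' then d :: pvMaskFill ms ds else m :: pvMaskFill ms (d :: ds)

def formatar_cpf_cnpj_alt (valor : String) : String :=
  let numeros := valor.toList.filter PySem.Chars.isdigit
  let mask := (if numeros.length ≤ 11 then "XXX.XXX.XXX-XX" else "XX.XXX.XXX/XXXX-XX").toList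
  String.ofList (pvMaskFill mask numeros)

-- ===== PRECONDITION & SPEC =====
def Spec_formatar_cpf_cnpj (valor : String) (out : String) : Prop := out = formatar_cpf_cnpj_alt valor
instance (valor : String) (out : String) : Decidable (Spec_formatar_cpf_cnpj valor out) := by unfold Spec_formatar_cpf_cnpj; infer_instance

-- ===== CLAIM (what is proved, stated in full; the proofs are below) =====
def Claim_equal_formatar_cpf_cnpj : Prop := ∀ (valor : String), Dom_formatar_cpf_cnpj valor → Spec_formatar_cpf_cnpj valor (formatar_cpf_cnpj valor)

-- ===== LEMMAS AND PROOFS =====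

-- Both ports depend on the input only through the extracted digit list, so it is
-- enough to compare them on an arbitrary digit list: a 15-way case split on its
-- length (0..13 and ≥ 14) evaluates both sides to the same literal list.
theorem pvKey (valor : String) : formatar_cpf_cnpj valor = formatar_cpf_cnpj_alt valor := by
  unfold formatar_cpf_cnpj formatar_cpf_cnpj_alt
  generalize valor.toList.filter PySem.Chars.isdigit = ds
  rcases ds with _|⟨a1,_|⟨a2,_|⟨a3,_|⟨a4,_|⟨a5,_|⟨a6,_|⟨a7,_|⟨a8,_|⟨a9,_|⟨a10,_|⟨a11,_|⟨a12,_|⟨a13,_|⟨a14,rest⟩⟩⟩⟩⟩⟩⟩⟩⟩⟩⟩⟩⟩⟩ <;>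
    simp [pvMaskFill, PySem.List.slice] <;>
    (split_ifs <;>
      first
        | (exfalso; omega)
        | (simp [pvMaskFill]; cases rest <;> rfl))

-- ===== VERDICT (by name: the statement is the Claim_ definition above) =====
theorem formatar_cpf_cnpj_spec : Claim_equal_formatar_cpf_cnpj := by
  intro valor _
  unfold Spec_formatar_cpf_cnpj
  exact pvKey valor
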